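-- pv_equiv track=rewrite | github.com/Fzq5454/Ferrys-Action-Project | main.py | extract_debug_directives_and_clean_code
-- ===== SOURCE A (Python) =====
-- def extract_debug_directives_and_clean_code(code):
--     lines = code.split('\n')
--     cleaned_lines = []
--     debug_mode = False
--     debug_plus_mode = False
--
--     for line in lines:
--         stripped_line = line.strip()
--         if stripped_line == '@debug=true':
--             debug_mode = True
--             continue
--         elif stripped_line == '@debug=false':
--             debug_mode = False
--             continue
--         elif stripped_line == '@debugPL=true':
--             debug_plus_mode = True
--             continue
--         elif stripped_line == '@debugPL=false':
--             debug_plus_mode = False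
--             continue
--         else:
--             cleaned_lines.append(line)
--
--     cleaned_code = '\n'.join(cleaned_lines)
--     return debug_mode, debug_plus_mode, cleaned_code
-- ===== SOURCE B (Python) =====
-- DIRECTIVES = {'@debug=true', '@debug=false', '@debugPL=true', '@debugPL=false'}
--
--
-- def _last_flag(lines, true_s, false_s):
--     for line in reversed(lines):
--         s = line.strip()
--         if s == true_s:
--             return True
--         if s == false_s:
--             return False
--     return False
--
--
-- def extract_debug_directives_and_clean_code(code):
--     lines = code.split('\n')
--     cleaned_code = '\n'.join(l for l in lines if l.strip() not in DIRECTIVES)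
--     debug_mode = _last_flag(lines, '@debug=true', '@debug=false')
--     debug_plus_mode = _last_flag(lines, '@debugPL=true', '@debugPL=false')
--     return debug_mode, debug_plus_mode, cleaned_code
-- ===== Notes on version B (the rewrite author's own statement) =====
-- stated objective: alternative
-- what changed: Replaces the single stateful loop (flag toggles plus append) by three independent passes: a filter-and-join comprehension for the cleaned code and, per flag, a last-occurrence scan over the reversed lines where the last @debug/@debugPL directive wins (default False).
import Mathlib
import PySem

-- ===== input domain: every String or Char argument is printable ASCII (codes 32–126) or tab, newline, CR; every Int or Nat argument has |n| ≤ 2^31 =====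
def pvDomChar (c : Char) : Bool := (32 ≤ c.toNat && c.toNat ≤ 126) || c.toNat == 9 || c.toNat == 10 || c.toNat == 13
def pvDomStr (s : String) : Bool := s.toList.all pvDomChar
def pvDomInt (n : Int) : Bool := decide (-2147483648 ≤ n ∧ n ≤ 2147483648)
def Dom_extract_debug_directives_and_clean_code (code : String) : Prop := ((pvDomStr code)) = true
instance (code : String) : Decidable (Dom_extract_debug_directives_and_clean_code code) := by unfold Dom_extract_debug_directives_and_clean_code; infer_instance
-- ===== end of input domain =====

-- B replaces A's single stateful toggle loop by a filter-and-join pass plus two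
-- independent last-directive scans (alternative decomposition, same cost).

-- ===== PORT A =====
-- one step of A's loop body over the state (debug_mode, debug_plus_mode, cleaned_lines)
def pvAStep (st : Bool × Bool × List String) (line : String) : Bool × Bool × List String :=
  let s := PySem.Str.strip line
  if s == "@debug=true" then (true, st.2.1, st.2.2)
  else if s == "@debug=false" then (false, st.2.1, st.2.2)
  else if s == "@debugPL=true" then (st.1, true, st.2.2)
  else if s == "@debugPL=false" then (st.1, false, st.2.2)
  else (st.1, st.2.1, st.2.2 ++ [line])

def extract_debug_directives_and_clean_code (code : String) : Bool × Bool × String :=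
  let lines := (PySem.Str.split? code "\n").getD []
  let r := lines.foldl pvAStep (false, false, [])
  (r.1, r.2.1, PySem.Str.join "\n" r.2.2)

-- ===== PORT B =====
-- Source B's DIRECTIVES set membership test ('s not in DIRECTIVES')
def pvIsDirective (s : String) : Bool :=
  s == "@debug=true" || s == "@debug=false" || s == "@debugPL=true" || s == "@debugPL=false"

-- Source B's _last_flag: scan the reversed lines for the first matching directive
def pvLastFlag (trueS falseS : String) : List String → Bool
  | [] => false
  | l :: rest =>
    let s := PySem.Str.strip l
    if s == trueS then true
    else if s == falseS then false
    else pvLastFlag trueS falseS rest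

def extract_debug_directives_and_clean_code_alt (code : String) : Bool × Bool × String :=
  let lines := (PySem.Str.split? code "\n").getD []
  let cleaned := PySem.Str.join "\n" (lines.filter (fun l => !pvIsDirective (PySem.Str.strip l)))
  let debugMode := pvLastFlag "@debug=true" "@debug=false" lines.reverse
  let debugPlusMode := pvLastFlag "@debugPL=true" "@debugPL=false" lines.reverse
  (debugMode, debugPlusMode, cleaned)

-- ===== PRECONDITION & SPEC =====
def Spec_extract_debug_directives_and_clean_code (code : String) (out : Bool × Bool × String) : Prop := out = extract_debug_directives_and_clean_code_alt code
instance (code : String) (out : Bool × Bool × String) : Decidable (Spec_extract_debug_directives_and_clean_code code out) := by unfold Spec_extract_debug_directives_and_clean_code; infer_instance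

-- ===== CLAIM (what is proved, stated in full; the proofs are below) =====
def Claim_equal_extract_debug_directives_and_clean_code : Prop := ∀ (code : String), Dom_extract_debug_directives_and_clean_code code → Spec_extract_debug_directives_and_clean_code code (extract_debug_directives_and_clean_code code)

-- ===== LEMMAS AND PROOFS =====

-- pvLastFlag on reversed lines, generalized over the default returned at the end
def pvLastFlagD (trueS falseS : String) (dflt : Bool) : List String → Bool
  | [] => dflt
  | l :: rest =>
    let s := PySem.Str.strip l
    if s == trueS then true
    else if s == falseS then false
    else pvLastFlagD trueS falseS dflt rest

lemma pvLastFlagD_false (t f : String) (xs : List String) :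
    pvLastFlagD t f false xs = pvLastFlag t f xs := by
  induction xs with
  | nil => rfl
  | cons l rest ih => simp only [pvLastFlagD, pvLastFlag, ih]

lemma pvLastFlagD_append_singleton (t f : String) (d : Bool) (xs : List String) (l : String) :
    pvLastFlagD t f d (xs ++ [l]) =
      pvLastFlagD t f
        (if PySem.Str.strip l == t then true
         else if PySem.Str.strip l == f then false else d) xs := by
  induction xs with
  | nil => simp [pvLastFlagD]
  | cons x rest ih => simp only [List.cons_append, pvLastFlagD, ih]

lemma pvFoldl_eq (lines : List String) :
    ∀ (d dp : Bool) (acc : List String),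
      lines.foldl pvAStep (d, dp, acc) =
        (pvLastFlagD "@debug=true" "@debug=false" d lines.reverse,
         pvLastFlagD "@debugPL=true" "@debugPL=false" dp lines.reverse,
         acc ++ lines.filter (fun l => !pvIsDirective (PySem.Str.strip l))) := by
  induction lines with
  | nil => intro d dp acc; simp [pvLastFlagD]
  | cons l rest ih =>
    intro d dp acc
    simp only [List.foldl_cons, List.reverse_cons, pvLastFlagD_append_singleton,
      List.filter_cons]
    rw [show List.foldl pvAStep (pvAStep (d, dp, acc) l) rest =
        List.foldl pvAStep ((pvAStep (d, dp, acc) l).1,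
          (pvAStep (d, dp, acc) l).2.1, (pvAStep (d, dp, acc) l).2.2) rest from rfl]
    rw [ih]
    unfold pvAStep pvIsDirective
    split_ifs with h1 h2 h3 h4 <;> simp_all

-- ===== VERDICT (by name: the statement is the Claim_ definition above) =====
theorem extract_debug_directives_and_clean_code_spec : Claim_equal_extract_debug_directives_and_clean_code := by
  intro code _
  show _ = _
  unfold extract_debug_directives_and_clean_code extract_debug_directives_and_clean_code_alt
  dsimp only
  rw [pvFoldl_eq]
  simp [pvLastFlagD_false]
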